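-- pv_equiv track=rewrite | github.com/neozhaoliang/pywonderland | src/misc/rsk_correspondence.py | schensted_insert
-- ===== SOURCE A (Python) =====
-- from copy import deepcopy
--
-- def schensted_insert(P, x):
--     """
--     Standard RSK insertion algorithm.
--     Returns:
--         - P_new: The updated tableau structure.
--         - chain: A list of animation steps containing (value, old_pos, new_pos).
--     """
--     P_new = deepcopy(P)
--     chain = []
--     row_idx = 0
--     curr_val = x
--     old_rc = None
--
--     while True:
--         # Case 1: The tableau is empty or we reached the bottom.
--         # Create a new row with the current value.
--         if row_idx == len(P_new):
--             P_new.append([curr_val])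
--             chain.append((curr_val, old_rc, (row_idx, 0)))
--             break
--
--         row = P_new[row_idx]
--         # Find the first element in the current row that is larger than curr_val.
--         col_idx = next((i for i, v in enumerate(row) if v > curr_val), None)
--
--         # Case 2: No element is larger. Append curr_val to the end of this row.
--         if col_idx is None:
--             row.append(curr_val)
--             chain.append((curr_val, old_rc, (row_idx, len(row) - 1)))
--             break
--         # Case 3: Found a larger element. Bump it (kick it out).
--         else:
--             kicked_val = row[col_idx]
--             chain.append((curr_val, old_rc, (row_idx, col_idx)))
--
--             # Replace the value in the row
--             row[col_idx] = curr_val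
--
--             # The kicked value becomes the new current value to be inserted in the next row
--             curr_val = kicked_val
--             old_rc = (row_idx, col_idx)
--             row_idx += 1
--
--     return P_new, chain
-- ===== SOURCE B (Python) =====
-- def schensted_insert(P, x):
--     """Purely functional RSK insertion: structural recursion over the rows,
--     rebuilding rows and the chain without mutation or deepcopy."""
--     def insert_rows(rows, row_idx, curr, old_rc):
--         if not rows:
--             return [[curr]], [(curr, old_rc, (row_idx, 0))]
--         row, rest = rows[0], rows[1:]
--         k = 0
--         while k < len(row) and row[k] <= curr:
--             k += 1
--         step = (curr, old_rc, (row_idx, k))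
--         if k == len(row):
--             return [row + [curr]] + rest, [step]
--         new_rows, steps = insert_rows(rest, row_idx + 1, row[k], (row_idx, k))
--         return [row[:k] + [curr] + row[k + 1:]] + new_rows, [step] + steps
--     return insert_rows(list(P), 0, x, None)
-- ===== Notes on version B (the rewrite author's own statement) =====
-- stated objective: simpler
-- what changed: Replaces A's imperative while loop that mutates a deepcopy of the tableau through row indices and in-place bumps with a pure structural recursion over the list of rows that rebuilds each touched row (prefix <= x, inserted value, suffix) and the chain by consing, with no mutation, no deepcopy and no index bookkeeping.
import Mathlib
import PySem

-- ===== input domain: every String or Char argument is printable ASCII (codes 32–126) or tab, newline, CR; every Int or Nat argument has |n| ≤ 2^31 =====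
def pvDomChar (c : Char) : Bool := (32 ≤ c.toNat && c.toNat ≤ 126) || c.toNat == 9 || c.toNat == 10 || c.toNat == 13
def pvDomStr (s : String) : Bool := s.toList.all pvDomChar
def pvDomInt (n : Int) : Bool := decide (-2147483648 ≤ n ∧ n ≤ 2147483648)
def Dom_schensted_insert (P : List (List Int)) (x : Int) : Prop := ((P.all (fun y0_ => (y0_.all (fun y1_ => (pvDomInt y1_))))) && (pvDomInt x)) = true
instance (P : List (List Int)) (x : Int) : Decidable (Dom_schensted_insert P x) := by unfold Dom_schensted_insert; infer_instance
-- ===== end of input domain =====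

-- B rewrites A's mutation-based while loop as a pure structural recursion over the rows (objective: simpler; return value only — A returns fresh deep copies while B may share untouched rows with the input).

-- ===== PORT A =====
-- the while loop of A, over the state (P_new, chain, row_idx, curr_val, old_rc);
-- P_new[row_idx] is in range whenever it is read (ported as getD; see the bump case)
def schenstedLoop (Pn : List (List Int))
    (chain : List (Int × (Option (Int × Int)) × (Int × Int)))
    (row_idx : Nat) (curr_val : Int) (old_rc : Option (Int × Int)) :
    List (List Int) × (List (Int × (Option (Int × Int)) × (Int × Int))) :=
  if row_idx = Pn.length then
    (Pn ++ [[curr_val]], chain ++ [(curr_val, old_rc, ((row_idx : Int), 0))])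
  else
    let row := Pn.getD row_idx []
    match hfind : row.findIdx? (fun v => curr_val < v) with
    | none =>
        (Pn.set row_idx (row ++ [curr_val]),
         chain ++ [(curr_val, old_rc, ((row_idx : Int), ((row ++ [curr_val]).length : Int) - 1))])
    | some col_idx =>
        let kicked_val := row.getD col_idx 0
        schenstedLoop (Pn.set row_idx (row.set col_idx curr_val))
          (chain ++ [(curr_val, old_rc, ((row_idx : Int), (col_idx : Int)))])
          (row_idx + 1) kicked_val (some ((row_idx : Int), (col_idx : Int)))
  termination_by Pn.length - row_idx
  decreasing_by
    have hrow : row ≠ [] := by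
      intro hnil
      rw [hnil] at hfind
      simp at hfind
    have hlt : row_idx < Pn.length := by
      by_contra hge
      apply hrow
      show Pn.getD row_idx [] = []
      simp [List.getD, List.getElem?_eq_none (by omega : Pn.length ≤ row_idx)]
    simp only [List.length_set]
    omega

def schensted_insert (P : List (List Int)) (x : Int) : List (List Int) × (List (Int × (Option (Int × Int)) × (Int × Int))) :=
  schenstedLoop P [] 0 x none

-- ===== PORT B =====
-- the inner while loop of B: length of the prefix of elements ≤ curr
def bScan (curr : Int) : List Int → Nat
  | [] => 0
  | v :: vs => if v ≤ curr then bScan curr vs + 1 else 0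

-- B's recursive insert_rows
def insertRows (rows : List (List Int)) (row_idx : Nat) (curr : Int) (old_rc : Option (Int × Int)) :
    List (List Int) × (List (Int × (Option (Int × Int)) × (Int × Int))) :=
  match rows with
  | [] => ([[curr]], [(curr, old_rc, ((row_idx : Int), 0))])
  | row :: rest =>
      let k := bScan curr row
      let step := (curr, old_rc, ((row_idx : Int), (k : Int)))
      if k = row.length then
        ((row ++ [curr]) :: rest, [step])
      else
        let (new_rows, steps) := insertRows rest (row_idx + 1) (row.getD k 0) (some ((row_idx : Int), (k : Int)))
        ((row.take k ++ [curr] ++ row.drop (k + 1)) :: new_rows, step :: steps)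

def schensted_insert_alt (P : List (List Int)) (x : Int) : List (List Int) × (List (Int × (Option (Int × Int)) × (Int × Int))) :=
  insertRows P 0 x none

-- ===== PRECONDITION & SPEC =====
def Spec_schensted_insert (P : List (List Int)) (x : Int) (out : List (List Int) × (List (Int × (Option (Int × Int)) × (Int × Int)))) : Prop := out = schensted_insert_alt P x
instance (P : List (List Int)) (x : Int) (out : List (List Int) × (List (Int × (Option (Int × Int)) × (Int × Int)))) : Decidable (Spec_schensted_insert P x out) := by unfold Spec_schensted_insert; infer_instance

-- ===== CLAIM (what is proved, stated in full; the proofs are below) =====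
def Claim_equal_schensted_insert : Prop := ∀ (P : List (List Int)) (x : Int), Dom_schensted_insert P x → Spec_schensted_insert P x (schensted_insert P x)

-- ===== LEMMAS AND PROOFS =====

-- A's linear `next` search expressed through B's prefix count
theorem findIdx?_eq_bScan (c : Int) (row : List Int) :
    row.findIdx? (fun v => c < v) =
      if bScan c row = row.length then none else some (bScan c row) := by
  induction row with
  | nil => simp [bScan]
  | cons v vs ih =>
    by_cases h : c < v
    · have hb : bScan c (v :: vs) = 0 := by simp [bScan, not_le.mpr h]
      simp [List.findIdx?_cons, h, hb]
    · have hle : v ≤ c := le_of_not_gt h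
      have hb : bScan c (v :: vs) = bScan c vs + 1 := by simp [bScan, hle]
      rw [List.findIdx?_cons]
      simp only [decide_eq_true_eq, if_neg h, hb, List.length_cons, ih]
      by_cases h2 : bScan c vs = vs.length
      · simp [h2]
      · simp [h2]

theorem bScan_le_length (c : Int) (row : List Int) : bScan c row ≤ row.length := by
  induction row with
  | nil => simp [bScan]
  | cons v vs ih =>
    by_cases h : v ≤ c
    · simp [bScan, h]; omega
    · simp [bScan, h]

theorem loop_eq (rest : List (List Int)) : ∀ (pre : List (List Int))
    (chain : List (Int × (Option (Int × Int)) × (Int × Int))) (c : Int) (orc : Option (Int × Int)),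
    schenstedLoop (pre ++ rest) chain pre.length c orc =
      ((pre ++ (insertRows rest pre.length c orc).1), chain ++ (insertRows rest pre.length c orc).2) := by
  induction rest with
  | nil =>
    intro pre chain c orc
    rw [schenstedLoop]
    simp [insertRows]
  | cons row rest' ih =>
    intro pre chain c orc
    have hne : pre.length ≠ (pre ++ row :: rest').length := by
      rw [List.length_append, List.length_cons]; omega
    have hget : (pre ++ row :: rest').getD pre.length [] = row := by
      simp [List.getD]
    have hset : ∀ r : List Int, (pre ++ row :: rest').set pre.length r = pre ++ r :: rest' := by
      intro r
      rw [List.set_append_right _ _ (le_refl pre.length)]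
      simp
    rw [schenstedLoop]
    simp only [hne, if_false]
    split
    · -- Case 2 of A: no larger element found
      next heq =>
      rw [hget, findIdx?_eq_bScan] at heq
      have hk : bScan c row = row.length := by
        by_contra hk; simp [hk] at heq
      rw [hget, insertRows]
      simp only [if_pos hk, hset]
      have hlen1 : ((row ++ [c]).length : Int) - 1 = ((bScan c row : Nat) : Int) := by
        simp only [List.length_append, List.length_cons, List.length_nil, hk]; push_cast; omega
      rw [hlen1]
    · -- Case 3 of A: bump
      next col_idx heq =>
      rw [hget, findIdx?_eq_bScan] at heq
      have hk : bScan c row ≠ row.length := by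
        intro hk; simp [hk] at heq
      have hcol : col_idx = bScan c row := by
        rw [if_neg hk] at heq; exact (Option.some_inj.mp heq).symm
      have hklt : bScan c row < row.length := lt_of_le_of_ne (bScan_le_length c row) hk
      rw [hget, insertRows]
      simp only [if_neg hk]
      subst hcol
      rw [hset]
      have hsplit : pre ++ row.set (bScan c row) c :: rest' = (pre ++ [row.set (bScan c row) c]) ++ rest' := by
        simp
      have hlen : pre.length + 1 = (pre ++ [row.set (bScan c row) c]).length := by simp
      rw [hsplit, hlen, ih]
      have hsetrow : row.set (bScan c row) c =
          row.take (bScan c row) ++ [c] ++ row.drop (bScan c row + 1) := by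
        rw [List.set_eq_take_append_cons_drop, if_pos hklt]
        simp
      simp [hsetrow]

-- ===== VERDICT (by name: the statement is the Claim_ definition above) =====
theorem schensted_insert_spec : Claim_equal_schensted_insert := by
  intro P x _
  unfold Spec_schensted_insert schensted_insert schensted_insert_alt
  have := loop_eq P [] [] x none
  simpa using this
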